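-- pv_equiv track=rewrite | github.com/openstack/os-brick | os_brick/initiator/connectors/fibre_channel.py | _get_pci_num
-- ===== SOURCE A (Python) =====
-- def _get_pci_num(hba):
--     # NOTE(walter-boring)
--     # device path is in format of (FC and FCoE) :
--     # /sys/devices/pci0000:00/0000:00:03.0/0000:05:00.3/host2/fc_host/host2
--     # /sys/devices/pci0000:20/0000:20:03.0/0000:21:00.2/net/ens2f2/ctlr_2
--     # /host3/fc_host/host3
--     # we always want the value prior to the host or net value
--     # on non x86_64 device, pci devices may be appended on platform device,
--     # /sys/devices/platform/smb/smb:motherboard/80040000000.peu0-c0/pci0000:00/0000:00:03.0/0000:05:00.3/host2/fc_host/host2  # noqa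
--     # so also return a platform id if it exists
--     platform = None
--     if hba is not None:
--         if "device_path" in hba:
--             device_path = hba['device_path'].split('/')
--             has_platform = (len(device_path) > 3
--                             and device_path[3] == 'platform')
--             for index, value in enumerate(device_path):
--                 if has_platform and value.startswith('pci'):
--                     platform = "platform-%s" % device_path[index - 1]
--                 if value.startswith('net') or value.startswith('host'):
--                     return platform, device_path[index - 1]
--     return None, None
-- ===== SOURCE B (Python) =====
-- def _get_pci_num(hba):
--     if hba is None or "device_path" not in hba:
--         return None, None
--     device_path = hba['device_path'].split('/')
--     boundary = next((i for i, v in enumerate(device_path)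
--                      if v.startswith('net') or v.startswith('host')), None)
--     if boundary is None:
--         return None, None
--     platform = None
--     if len(device_path) > 3 and device_path[3] == 'platform':
--         for j in range(boundary - 1, -1, -1):
--             if device_path[j].startswith('pci'):
--                 platform = "platform-%s" % device_path[j - 1]
--                 break
--     return platform, device_path[boundary - 1]
-- ===== Notes on version B (the rewrite author's own statement) =====
-- stated objective: simpler
-- what changed: Replaces the single interleaved forward loop (which keeps overwriting a platform accumulator until it hits the boundary) by a boundary-first decomposition: find the first net/host component, then, only if the path is a platform path, scan backward from the boundary and stop at the first pci component.
import Mathlib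
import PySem

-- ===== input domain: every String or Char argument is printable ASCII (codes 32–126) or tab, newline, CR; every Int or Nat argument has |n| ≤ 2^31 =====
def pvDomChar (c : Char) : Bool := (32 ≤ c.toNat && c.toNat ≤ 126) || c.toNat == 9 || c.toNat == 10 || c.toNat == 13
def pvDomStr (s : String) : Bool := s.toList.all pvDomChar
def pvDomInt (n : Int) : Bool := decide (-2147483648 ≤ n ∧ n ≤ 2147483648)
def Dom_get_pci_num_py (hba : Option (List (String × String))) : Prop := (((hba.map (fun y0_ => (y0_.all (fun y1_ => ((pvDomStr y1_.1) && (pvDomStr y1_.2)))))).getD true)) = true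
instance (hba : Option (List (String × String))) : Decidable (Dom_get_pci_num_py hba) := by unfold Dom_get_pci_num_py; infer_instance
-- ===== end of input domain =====

-- B replaces A's single interleaved forward scan by a boundary-first decomposition
-- (find the first net/host component, then scan backward for the last pci component);
-- objective: simpler.

-- ===== PORT A =====
-- "platform-%s" % device_path[i - 1]  (the index is always in range: split output is nonempty)
def pvPlat (dp : List String) (i : Nat) : String :=
  "platform-" ++ ((PySem.List.pyGet? dp ((i : Int) - 1)).getD "")

-- hba['device_path'].split('/')  (separator nonempty, so split? never returns none)
def pvSplit (s : String) : List String := (PySem.Str.split? s "/").getD []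

-- the 'for index, value in enumerate(device_path)' loop of A, with its early return
def pvALoop (dp : List String) (hp : Bool) :
    List String → Nat → Option String → Option String × Option String
  | [], _, _ => (none, none)
  | v :: rest, i, platform =>
    let platform := if hp && PySem.Str.startswith v "pci" then some (pvPlat dp i) else platform
    if PySem.Str.startswith v "net" || PySem.Str.startswith v "host" then
      (platform, PySem.List.pyGet? dp ((i : Int) - 1))
    else
      pvALoop dp hp rest (i + 1) platform

def get_pci_num_py (hba : Option (List (String × String))) : Option String × Option String :=
  match hba with
  | none => (none, none)
  | some h =>
    match h.lookup "device_path" with      -- '"device_path" in hba' + 'hba["device_path"]'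
    | none => (none, none)
    | some s =>
      let dp := pvSplit s
      let hp := decide (dp.length > 3) && (dp.getD 3 "" == "platform")
      pvALoop dp hp dp 0 none

-- ===== PORT B =====
-- backward scan 'for j in range(boundary - 1, -1, -1): … break' of B
def pvBScan (dp : List String) : Nat → Option String
  | 0 => none
  | j + 1 =>
    if PySem.Str.startswith (dp.getD j "") "pci" then some (pvPlat dp j)
    else pvBScan dp j

def get_pci_num_py_alt (hba : Option (List (String × String))) : Option String × Option String :=
  match hba with
  | none => (none, none)
  | some h =>
    match h.lookup "device_path" with
    | none => (none, none)
    | some s =>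
      let dp := pvSplit s
      match dp.findIdx? (fun v => PySem.Str.startswith v "net" || PySem.Str.startswith v "host") with
      | none => (none, none)
      | some b =>
        let platform :=
          if decide (dp.length > 3) && (dp.getD 3 "" == "platform") then pvBScan dp b
          else none
        (platform, PySem.List.pyGet? dp ((b : Int) - 1))

-- ===== PRECONDITION & SPEC =====
def Spec_get_pci_num_py (hba : Option (List (String × String))) (out : Option String × Option String) : Prop := out = get_pci_num_py_alt hba
instance (hba : Option (List (String × String))) (out : Option String × Option String) : Decidable (Spec_get_pci_num_py hba out) := by unfold Spec_get_pci_num_py; infer_instance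

-- ===== CLAIM (what is proved, stated in full; the proofs are below) =====
def Claim_equal_get_pci_num_py : Prop := ∀ (hba : Option (List (String × String))), Dom_get_pci_num_py hba → Spec_get_pci_num_py hba (get_pci_num_py hba)

-- ===== LEMMAS AND PROOFS =====

-- forward rendering of A's platform accumulator over n components starting at index k
def pvFwd (dp : List String) (hp : Bool) : Nat → Nat → Option String → Option String
  | 0, _, p => p
  | n + 1, k, p =>
    pvFwd dp hp n (k + 1)
      (if hp && PySem.Str.startswith (dp.getD k "") "pci" then some (pvPlat dp k) else p)

-- backward scan over indices k+n-1 … k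
def pvBk (dp : List String) (k : Nat) : Nat → Option String
  | 0 => none
  | n + 1 =>
    if PySem.Str.startswith (dp.getD (k + n) "") "pci" then some (pvPlat dp (k + n))
    else pvBk dp k n

theorem pvBk_peel_bottom (dp : List String) (k n : Nat) :
    pvBk dp k (n + 1) =
      (pvBk dp (k + 1) n).or
        (if PySem.Str.startswith (dp.getD k "") "pci" then some (pvPlat dp k) else none) := by
  induction n with
  | zero => simp [pvBk]
  | succ n ih =>
    show (if PySem.Str.startswith (dp.getD (k + (n+1)) "") "pci" then _ else pvBk dp k (n+1)) = _
    rw [ih]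
    have hkn : k + 1 + n = k + (n + 1) := by omega
    by_cases h : PySem.Str.startswith (dp.getD (k + (n+1)) "") "pci" = true <;>
      simp only [pvBk, hkn] <;> simp at h <;> simp [h]

theorem pvFwd_eq_pvBk (dp : List String) (n : Nat) : ∀ (k : Nat) (p : Option String),
    pvFwd dp true n k p = ((pvBk dp k n).map some).getD p := by
  induction n with
  | zero => intro k p; rfl
  | succ n ih =>
    intro k p
    show pvFwd dp true n (k + 1) _ = _
    rw [ih, pvBk_peel_bottom]
    by_cases h : PySem.Str.startswith (dp.getD k "") "pci" = true <;>
      cases hb : pvBk dp (k + 1) n <;> simp at h ⊢ <;> simp [h]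

theorem pvFwd_false (dp : List String) (n : Nat) : ∀ (k : Nat) (p : Option String),
    pvFwd dp false n k p = p := by
  induction n with
  | zero => intro k p; rfl
  | succ n ih => intro k p; simpa [pvFwd] using ih (k + 1) p

-- a net/host component never starts with 'pci'
theorem pv_not_pci {v : String}
    (h : (PySem.Str.startswith v "net" || PySem.Str.startswith v "host") = true) :
    PySem.Str.startswith v "pci" = false := by
  by_contra hc
  have hp : "pci".toList <+: v.toList :=
    (PySem.Chars.startswith_iff _ _).mp (by simp at hc; simpa [PySem.Str.startswith] using hc)
  obtain ⟨t1, e1⟩ := hp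
  simp only [Bool.or_eq_true] at h
  rcases h with h1 | h1
  · have h1' : "net".toList <+: v.toList :=
      (PySem.Chars.startswith_iff _ _).mp (by simpa [PySem.Str.startswith] using h1)
    obtain ⟨t2, e2⟩ := h1'
    have := e1.trans e2.symm; simp at this
  · have h1' : "host".toList <+: v.toList :=
      (PySem.Chars.startswith_iff _ _).mp (by simpa [PySem.Str.startswith] using h1)
    obtain ⟨t2, e2⟩ := h1'
    have := e1.trans e2.symm; simp at this

-- characterization of A's loop: boundary-first view
theorem pvALoop_eq (dp : List String) (hp : Bool) : ∀ (s : List String) (k : Nat) (p : Option String),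
    s = dp.drop k →
    pvALoop dp hp s k p =
      match s.findIdx? (fun v => PySem.Str.startswith v "net" || PySem.Str.startswith v "host") with
      | none => (none, none)
      | some r => (pvFwd dp hp r k p, PySem.List.pyGet? dp ((k + r : Int) - 1)) := by
  intro s
  induction s with
  | nil => intro k p _; rfl
  | cons v rest ih =>
    intro k p hs
    have hv : dp.getD k "" = v := by
      have hget : dp[k]? = some v := by
        have := congrArg (fun l => l.head?) hs
        simpa [List.head?_drop] using this.symm
      simp [List.getD, hget]
    have hrest : rest = dp.drop (k + 1) := by
      have := congrArg (fun l => l.tail) hs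
      simpa [List.tail_drop] using this
    rw [List.findIdx?_cons]
    by_cases hb : (PySem.Str.startswith v "net" || PySem.Str.startswith v "host") = true
    · have hnp : PySem.Str.startswith v "pci" = false := pv_not_pci hb
      have h0 : pvALoop dp hp (v :: rest) k p = (p, PySem.List.pyGet? dp ((k : Int) - 1)) := by
        simp only [pvALoop]
        simp at hb hnp ⊢
        simp [hb, hnp]
      rw [h0]
      simp at hb
      simp [hb, pvFwd]
    · have h0 : pvALoop dp hp (v :: rest) k p
            = pvALoop dp hp rest (k + 1)
                (if hp && PySem.Str.startswith v "pci" then some (pvPlat dp k) else p) := by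
        simp only [pvALoop]
        simp at hb ⊢
        simp [hb]
      rw [h0, ih (k + 1) _ hrest]
      simp only [Bool.not_eq_true] at hb
      rw [hb]
      simp only [Bool.false_eq_true, if_false]
      cases hf : rest.findIdx? (fun v => PySem.Str.startswith v "net" || PySem.Str.startswith v "host") with
      | none => simp
      | some r =>
        simp only [Option.map_some]
        have h1 : pvFwd dp hp (r + 1) k p
            = pvFwd dp hp r (k + 1)
                (if hp && PySem.Str.startswith v "pci" then some (pvPlat dp k) else p) := by
          simp only [pvFwd, hv]
        rw [← h1]
        have h2 : ((k : Int) + 1 + r) - 1 = ((k : Int) + (r + 1)) - 1 := by ring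
        push_cast
        rw [h2]

theorem pvBScan_eq_pvBk (dp : List String) (b : Nat) : pvBScan dp b = pvBk dp 0 b := by
  induction b with
  | zero => rfl
  | succ b ih => simp [pvBScan, pvBk, ih]

-- ===== VERDICT (by name: the statement is the Claim_ definition above) =====
theorem get_pci_num_py_spec : Claim_equal_get_pci_num_py := by
  intro hba _
  unfold Spec_get_pci_num_py get_pci_num_py get_pci_num_py_alt
  cases hba with
  | none => rfl
  | some h =>
    cases hl : h.lookup "device_path" with
    | none => simp [hl]
    | some s =>
      simp only [hl]
      set dp := pvSplit s with hdp
      rw [pvALoop_eq dp _ dp 0 none (by simp)]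
      cases hf : dp.findIdx? (fun v => PySem.Str.startswith v "net" || PySem.Str.startswith v "host") with
      | none => rfl
      | some b =>
        simp only
        by_cases hp : (decide (dp.length > 3) && (dp.getD 3 "" == "platform")) = true
        · rw [hp]
          simp only [if_true]
          rw [pvFwd_eq_pvBk, pvBScan_eq_pvBk]
          cases pvBk dp 0 b <;> simp
        · rw [Bool.eq_false_iff.mpr hp, pvFwd_false]
          simp
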